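-- pv_equiv track=rewrite | github.com/JaiRaga/Codeforces-problemset | elephant.py | elephant
-- ===== SOURCE A (Python) =====
-- def elephant(n):
--     lis = [5, 4, 3, 2, 1]
--     steps = 0
--     num = n
--     for i in lis:
--         if n >= i:
--             steps += (n // i)
--             n %= i
--         elif lis.count(n) > 0:
--             steps += 1
--             n = 0
--
--     return steps
-- ===== SOURCE B (Python) =====
-- def elephant(n):
--     return max(0, (n + 4) // 5)
-- ===== Notes on version B (the rewrite author's own statement) =====
-- stated objective: simpler
-- what changed: Replaced the greedy loop over descending step sizes (with its list.count membership scan) by a single closed-form expression: ceiling division by the largest step, clamped at zero.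
import Mathlib
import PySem

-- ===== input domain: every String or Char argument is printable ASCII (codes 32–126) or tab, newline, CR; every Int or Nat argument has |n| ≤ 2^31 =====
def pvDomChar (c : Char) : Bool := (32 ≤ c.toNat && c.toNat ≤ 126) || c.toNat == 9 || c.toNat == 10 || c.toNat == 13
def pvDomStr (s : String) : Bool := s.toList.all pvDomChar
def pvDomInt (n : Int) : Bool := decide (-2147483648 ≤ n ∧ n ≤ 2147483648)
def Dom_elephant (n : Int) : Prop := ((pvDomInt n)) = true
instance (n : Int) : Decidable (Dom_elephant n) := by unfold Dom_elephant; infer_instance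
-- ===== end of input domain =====

-- B replaces A's greedy loop over [5,4,3,2,1] with the closed form max(0, (n+4)//5) (simpler).

-- ===== PORT A =====
-- lis = [5, 4, 3, 2, 1]
def pvLis : List Int := [5, 4, 3, 2, 1]

-- one iteration of A's 'for i in lis' body over the state (steps, n)
def pvStep (st : Int × Int) (i : Int) : Int × Int :=
  if st.2 ≥ i then (st.1 + PySem.Int.floordiv st.2 i, PySem.Int.mod st.2 i)
  else if PySem.List.count pvLis st.2 > 0 then (st.1 + 1, 0)
  else st

-- 'num = n' in A is never used afterwards, so it has no counterpart here
def elephant (n : Int) : Int :=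
  (pvLis.foldl pvStep (0, n)).1

-- ===== PORT B =====
def elephant_alt (n : Int) : Int :=
  max 0 (PySem.Int.floordiv (n + 4) 5)

-- ===== PRECONDITION & SPEC =====
def Spec_elephant (n : Int) (out : Int) : Prop := out = elephant_alt n
instance (n : Int) (out : Int) : Decidable (Spec_elephant n out) := by unfold Spec_elephant; infer_instance

-- ===== CLAIM (what is proved, stated in full; the proofs are below) =====
def Claim_equal_elephant : Prop := ∀ (n : Int), Dom_elephant n → Spec_elephant n (elephant n)

-- ===== LEMMAS AND PROOFS =====

-- for n ≤ 0 every iteration is a no-op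
theorem pvStep_nonpos (s m i : Int) (hm : m ≤ 0) (hi : 1 ≤ i) : pvStep (s, m) i = (s, m) := by
  have h1 : ¬ (m ≥ i) := by omega
  have h2 : m ∉ pvLis := by simp [pvLis]; omega
  simp [pvStep, h1, h2]

-- the tail of the loop, started with remainder 0 ≤ m ≤ 4: one extra jump iff m > 0
theorem pvTail (s m : Int) (h0 : 0 ≤ m) (h4 : m ≤ 4) :
    ([4, 3, 2, 1] : List Int).foldl pvStep (s, m) = (if m = 0 then s else s + 1, 0) := by
  interval_cases m <;>
    simp [List.foldl, pvStep, pvLis, PySem.List.count, List.count, PySem.Int.floordiv, PySem.Int.mod]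

-- ===== VERDICT (by name: the statement is the Claim_ definition above) =====
theorem elephant_spec : Claim_equal_elephant := by
  intro n _
  unfold Spec_elephant elephant elephant_alt
  have hlis : pvLis = (5 : Int) :: [4, 3, 2, 1] := rfl
  rw [PySem.Int.floordiv_eq_ediv_of_pos (by norm_num : (0:Int) < 5)]
  by_cases h5 : n ≥ 5
  · -- first iteration takes the '//'-branch; remainder 0..4 finishes the loop
    have hstep : pvStep (0, n) 5 = (PySem.Int.floordiv n 5, PySem.Int.mod n 5) := by
      simp [pvStep, h5]
    rw [hlis, List.foldl_cons, hstep,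
        pvTail _ _ (PySem.Int.mod_nonneg n (by norm_num)) (by
          have := PySem.Int.mod_lt n (b := 5) (by norm_num); omega)]
    rw [PySem.Int.floordiv_eq_ediv_of_pos (by norm_num : (0:Int) < 5),
        PySem.Int.mod_eq_emod_of_pos (by norm_num : (0:Int) < 5)]
    split_ifs <;> omega
  · by_cases h1 : 1 ≤ n
    · -- 1 ≤ n ≤ 4: the 'n in lis' branch fires once, answer 1
      have hstep : pvStep (0, n) 5 = (1, 0) := by
        have hc : n ∈ pvLis := by simp [pvLis]; omega
        simp [pvStep, h5, hc]
      rw [hlis, List.foldl_cons, hstep, pvTail _ _ le_rfl (by norm_num)]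
      norm_num
      omega
    · -- n ≤ 0: nothing ever fires, answer 0
      have hfix : ∀ i ∈ pvLis, ∀ s : Int, pvStep (s, n) i = (s, n) := by
        intro i hi s
        simp only [pvLis, List.mem_cons, List.not_mem_nil, or_false] at hi
        rcases hi with rfl | rfl | rfl | rfl | rfl <;>
          exact pvStep_nonpos _ _ _ (by omega) (by omega)
      have : pvLis.foldl pvStep (0, n) = (0, n) := by
        rw [hlis]
        simp [List.foldl, hfix 5 (by decide), hfix 4 (by decide), hfix 3 (by decide),
              hfix 2 (by decide), hfix 1 (by decide)]
      rw [this]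
      omega
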